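-- pv_equiv track=rewrite | github.com/Vatsu04/Projeto-de-Extens-o-VII---Cifra-de-Blocos | Funcoes/bloco_cipher.py | permute_inv
-- ===== SOURCE A (Python) =====
-- def permute_inv(block_int, subkey):
--     """
--     Inversa da permutação linear.
--     Calcula o inverso modular do multiplicador e desfaz o mapeamento:
--          original_index = inv_multiplier * (j - addend) mod 32
--     """
--     multiplier = (subkey & 0x1F) | 1
--     addend = (subkey >> 5) & 0x1F
--     # Calcula o inverso modular de 'multiplier' modulo 32.
--     inv_multiplier = 1
--     for x in range(1, 32):
--         if (multiplier * x) % 32 == 1: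
--             inv_multiplier = x
--             break
--     bits = [(block_int >> i) & 1 for i in range(32)]
--     unpermuted = [0] * 32
--     for j in range(32):
--         original_index = (inv_multiplier * ((j - addend) % 32)) % 32
--         unpermuted[original_index] = bits[j]
--     out = 0
--     for i in range(32):
--         out |= (unpermuted[i] << i)
--     return out
-- ===== SOURCE B (Python) =====
-- def permute_inv(block_int, subkey):
--     """Inverse linear permutation, gathered directly from the forward map:
--     output bit i comes from permuted position (multiplier*i + addend) % 32."""
--     multiplier = (subkey & 0x1F) | 1
--     addend = (subkey >> 5) & 0x1F
--     out = 0
--     for i in range(32):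
--         out |= ((block_int >> ((multiplier * i + addend) % 32)) & 1) << i
--     return out
-- ===== Notes on version B (the rewrite author's own statement) =====
-- stated objective: simpler
-- what changed: B drops A's modular-inverse search loop and the bits/unpermuted scatter arrays entirely: it gathers each output bit i directly from permuted position (multiplier*i+addend)%32 using the forward permutation formula, in one loop with no lists.
import Mathlib
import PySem

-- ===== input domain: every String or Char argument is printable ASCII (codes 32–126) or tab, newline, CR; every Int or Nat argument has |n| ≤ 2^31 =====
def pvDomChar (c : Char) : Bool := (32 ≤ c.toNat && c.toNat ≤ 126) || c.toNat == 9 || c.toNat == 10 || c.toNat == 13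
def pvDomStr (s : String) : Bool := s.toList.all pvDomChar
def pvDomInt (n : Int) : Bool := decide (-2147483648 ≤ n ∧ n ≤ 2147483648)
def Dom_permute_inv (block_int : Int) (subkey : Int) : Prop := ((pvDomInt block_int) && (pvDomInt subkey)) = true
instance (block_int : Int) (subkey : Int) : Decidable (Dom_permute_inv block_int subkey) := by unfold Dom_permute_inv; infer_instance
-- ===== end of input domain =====

-- B gathers each output bit directly from the forward permutation formula, removing A's
-- modular-inverse search loop and both intermediate 32-element arrays (objective: simpler).


-- ===== PORT A =====
-- 'for x in range(1, 32): if (multiplier * x) % 32 == 1: inv_multiplier = x; break'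
-- with initial value 1 (kept if no x matches)
def pvFindInv (multiplier : Int) : List Int → Int
  | [] => 1
  | x :: xs => if PySem.Int.mod (multiplier * x) 32 = 1 then x else pvFindInv multiplier xs

def permute_inv (block_int : Int) (subkey : Int) : Int :=
  let multiplier := PySem.Int.bor (PySem.Int.band subkey 0x1F) 1
  let addend := PySem.Int.band (subkey >>> 5) 0x1F
  let inv_multiplier := pvFindInv multiplier (PySem.List.pyRange 1 32 1)
  -- bits = [(block_int >> i) & 1 for i in range(32)]; i ∈ [0,32) so i.toNat is exact
  let bits := (PySem.List.pyRange 0 32 1).map (fun i => PySem.Int.band (block_int >>> i.toNat) 1)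
  -- 'unpermuted[original_index] = bits[j]': both indices always lie in [0,32), so the
  -- total forms pySetD / pyGetD are exact here
  let unpermuted := (PySem.List.pyRange 0 32 1).foldl
    (fun acc j =>
      PySem.List.pySetD acc (PySem.Int.mod (inv_multiplier * PySem.Int.mod (j - addend) 32) 32)
        (PySem.List.pyGetD bits j 0))
    (List.replicate 32 0)
  (PySem.List.pyRange 0 32 1).foldl
    (fun out i => PySem.Int.bor out (PySem.List.pyGetD unpermuted i 0 <<< i.toNat)) 0

-- ===== PORT B =====
def permute_inv_alt (block_int : Int) (subkey : Int) : Int :=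
  let multiplier := PySem.Int.bor (PySem.Int.band subkey 0x1F) 1
  let addend := PySem.Int.band (subkey >>> 5) 0x1F
  (PySem.List.pyRange 0 32 1).foldl
    (fun out i =>
      PySem.Int.bor out
        (PySem.Int.band (block_int >>> (PySem.Int.mod (multiplier * i + addend) 32).toNat) 1
          <<< i.toNat)) 0

-- ===== PRECONDITION & SPEC =====
def Spec_permute_inv (block_int : Int) (subkey : Int) (out : Int) : Prop := out = permute_inv_alt block_int subkey
instance (block_int : Int) (subkey : Int) (out : Int) : Decidable (Spec_permute_inv block_int subkey out) := by unfold Spec_permute_inv; infer_instance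

-- ===== CLAIM (what is proved, stated in full; the proofs are below) =====
def Claim_equal_permute_inv : Prop := ∀ (block_int : Int) (subkey : Int), Dom_permute_inv block_int subkey → Spec_permute_inv block_int subkey (permute_inv block_int subkey)

-- ===== LEMMAS AND PROOFS =====

-- Python's  x & 31  is  x mod 32, for every sign of x
theorem pv_band31 (x : Int) : PySem.Int.band x 31 = x % 32 := by
  unfold PySem.Int.band
  by_cases hx : 0 ≤ x
  · simp only [hx, if_true, show (0:Int) ≤ 31 by norm_num, show ((31:Int).toNat = 31) from rfl]
    rw [Nat.and_two_pow_sub_one_eq_mod x.toNat 5, show (2^5 : Nat) = 32 from rfl]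
    omega
  · simp only [hx, if_false, show (0:Int) ≤ 31 by norm_num, if_true,
      show ((31:Int).toNat = 31) from rfl]
    rw [Nat.land_comm, Nat.and_two_pow_sub_one_eq_mod (-x-1).toNat 5,
      show (2^5 : Nat) = 32 from rfl]
    omega

theorem pv_mulmod (x y : Int) : (x * (y % 32)) % 32 = (x * y) % 32 := by
  rw [Int.mul_emod, Int.emod_emod_of_dvd _ dvd_rfl, ← Int.mul_emod]

theorem pv_cancel (c t : Int) (hc : c % 32 = 1) : (c * t) % 32 = t % 32 := by
  obtain ⟨q, hq⟩ : ∃ q, c = 32 * q + 1 := ⟨c / 32, by omega⟩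
  subst hq
  rw [show (32 * q + 1) * t = t + 32 * (q * t) by ring, Int.add_mul_emod_self_left]

-- the computed inv_multiplier really is a modular inverse of the multiplier
theorem pv_inv_key (r : Int) (h0 : 0 ≤ r) (h1 : r < 32) :
    (pvFindInv (PySem.Int.bor r 1) (PySem.List.pyRange 1 32 1) * PySem.Int.bor r 1) % 32 = 1 := by
  interval_cases r <;> decide

-- a fold of writes that never touches position p leaves it unchanged
theorem pv_fold_set_untouched {α : Type} (g : Int → Nat) (bv : Int → α) (js : List Int)
    (init : List α) (p : Nat) (d : α) (h : ∀ j ∈ js, g j ≠ p) :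
    (js.foldl (fun acc j => acc.set (g j) (bv j)) init).getD p d = init.getD p d := by
  induction js generalizing init with
  | nil => rfl
  | cons j js ih =>
    simp only [List.foldl_cons]
    rw [ih _ (fun j' hj' => h j' (List.mem_cons_of_mem _ hj'))]
    have hne := h j (List.mem_cons_self ..)
    simp [List.getD, List.getElem?_set_ne hne]

theorem pv_fold_set_length {α : Type} (g : Int → Nat) (bv : Int → α) (js : List Int)
    (init : List α) :
    (js.foldl (fun acc j => acc.set (g j) (bv j)) init).length = init.length := by
  induction js generalizing init with
  | nil => rfl
  | cons j js ih => simp [List.foldl_cons, ih]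

-- scatter characterization: if j0 is the unique j ∈ js writing to position p, then
-- after the fold position p holds bv j0
theorem pv_fold_set_scatter {α : Type} (g : Int → Nat) (bv : Int → α) (js : List Int)
    (init : List α) (p : Nat) (j0 : Int) (d : α)
    (hmem : j0 ∈ js) (hj0 : g j0 = p) (hp : p < init.length)
    (huniq : ∀ j ∈ js, g j = p → j = j0) :
    (js.foldl (fun acc j => acc.set (g j) (bv j)) init).getD p d = bv j0 := by
  induction js generalizing init with
  | nil => cases hmem
  | cons j js ih =>
    simp only [List.foldl_cons]
    by_cases hj : j0 ∈ js
    · exact ih _ hj (by rw [List.length_set]; exact hp)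
        (fun j' hj' => huniq j' (List.mem_cons_of_mem _ hj'))
    · have hjj : j = j0 := by
        rcases List.mem_cons.mp hmem with h | h
        · exact h.symm
        · exact absurd h hj
      subst hjj
      rw [pv_fold_set_untouched _ _ _ _ _ _
        (fun j' hj' hgp => hj ((huniq j' (List.mem_cons_of_mem _ hj') hgp) ▸ hj'))]
      rw [hj0]
      simp [List.getD, hp]

-- the value A's scatter leaves at position i is exactly the bit B gathers there
theorem pv_unperm (block a m inv i : Int) (h0 : 0 ≤ i) (h1 : i < 32)
    (hmi : (inv * m) % 32 = 1) :
    PySem.List.pyGetD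
      ((PySem.List.pyRange 0 32 1).foldl
        (fun acc j => PySem.List.pySetD acc ((inv * ((j - a) % 32)) % 32)
          (PySem.List.pyGetD ((PySem.List.pyRange 0 32 1).map
            (fun k => PySem.Int.band (block >>> k.toNat) 1)) j 0))
        (List.replicate 32 0)) i 0
    = PySem.Int.band (block >>> ((((m * i + a) % 32)).toNat : Int)) 1 := by
  have hset : ∀ (acc : List Int) (q v : Int),
      PySem.List.pySetD acc ((inv * ((q - a) % 32)) % 32) v
        = acc.set (((inv * ((q - a) % 32)) % 32)).toNat v :=
    fun acc q v => PySem.List.pySetD_of_nonneg acc v (Int.emod_nonneg _ (by norm_num))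
  simp only [hset]
  have hlen : ((PySem.List.pyRange 0 32 1).foldl
      (fun acc j => acc.set (((inv * ((j - a) % 32)) % 32)).toNat
        (PySem.List.pyGetD ((PySem.List.pyRange 0 32 1).map
          (fun k => PySem.Int.band (block >>> k.toNat) 1)) j 0))
      (List.replicate 32 0)).length = 32 := by
    rw [pv_fold_set_length]; simp
  rw [PySem.List.pyGetD_eq_getElem _ _ h0 (by rw [hlen]; exact_mod_cast h1),
    ← List.getD_eq_getElem _ 0 (by rw [hlen]; omega)]
  have hj0b : 0 ≤ (m * i + a) % 32 ∧ (m * i + a) % 32 < 32 :=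
    ⟨Int.emod_nonneg _ (by norm_num), Int.emod_lt_of_pos _ (by norm_num)⟩
  have hmi' : (m * inv) % 32 = 1 := by rw [mul_comm]; exact hmi
  rw [pv_fold_set_scatter _ _ _ _ i.toNat ((m * i + a) % 32) 0
      (PySem.List.mem_pyRange_one.mpr ⟨hj0b.1, hj0b.2⟩)
      (by -- g j0 = i.toNat
        have e1 : ((m * i + a) % 32 - a) % 32 = (m * i) % 32 := by
          generalize m * i = t; omega
        have e2 : (inv * (((m * i + a) % 32 - a) % 32)) % 32 = i := by
          rw [e1, pv_mulmod, ← mul_assoc, pv_cancel _ _ hmi, Int.emod_eq_of_lt h0 h1]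
        rw [e2])
      (by rw [List.length_replicate]; omega)
      (by -- uniqueness of the writer of position i
        intro j hj hgj
        obtain ⟨hjl, hjr⟩ := PySem.List.mem_pyRange_one.mp hj
        have hji : (inv * ((j - a) % 32)) % 32 = i := by
          have hnn : 0 ≤ (inv * ((j - a) % 32)) % 32 := Int.emod_nonneg _ (by norm_num)
          omega
        have h2 : (m * i) % 32 = (j - a) % 32 := by
          rw [← hji, pv_mulmod, ← mul_assoc, pv_cancel _ _ hmi',
            Int.emod_emod_of_dvd _ dvd_rfl]
        generalize hmigen : m * i = s at h2
        omega)]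
  rw [PySem.List.pyGetD_map_pyRange_of_nonneg _ 32 _ 0 hj0b.1 hj0b.2]

-- ===== VERDICT (by name: the statement is the Claim_ definition above) =====
theorem permute_inv_spec : Claim_equal_permute_inv := by
  unfold Claim_equal_permute_inv Spec_permute_inv
  intro block subkey _
  have hmod : ∀ a : Int, PySem.Int.mod a 32 = a % 32 :=
    fun a => PySem.Int.mod_eq_emod_of_pos (by norm_num)
  simp only [permute_inv, permute_inv_alt, hmod, pv_band31]
  apply PySem.List.foldl_congr_mem
  intro out i hi
  obtain ⟨h0, h1⟩ := PySem.List.mem_pyRange_one.mp hi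
  have hr : 0 ≤ subkey % 32 ∧ subkey % 32 < 32 :=
    ⟨Int.emod_nonneg _ (by norm_num), Int.emod_lt_of_pos _ (by norm_num)⟩
  rw [pv_unperm block ((subkey >>> 5) % 32) (PySem.Int.bor (subkey % 32) 1)
    (pvFindInv (PySem.Int.bor (subkey % 32) 1) (PySem.List.pyRange 1 32 1)) i h0 h1
    (pv_inv_key (subkey % 32) hr.1 hr.2), Int.shiftRight_natCast_right]
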